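-- pv_equiv track=rewrite | github.com/ehc32/Translate-Git | Translate/04_Archive/Translate Sin Comentarios/006/version/version.py | _fn_clean_79
-- ===== SOURCE A (Python) =====
-- def _fn_clean_79(text: str) -> str:
--     """Limpia campo 79: quita saltos de línea y # / `."""
--     if text is None:
--         return ""
--     s = str(text)
--     # quitar saltos de línea
--     s = s.replace("\r", "").replace("\n", "")
--     # quitar caracteres especiales
--     for ch in "#/`":
--         s = s.replace(ch, "")
--     return s
-- ===== SOURCE B (Python) =====
-- def _fn_clean_79(text: str) -> str:
--     """Limpia campo 79: quita saltos de línea y # / `."""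
--     if text is None:
--         return ""
--     return "".join(c for c in str(text) if c not in "\r\n#/`")
-- ===== Notes on version B (the rewrite author's own statement) =====
-- stated objective: simpler
-- what changed: Replaced five sequential .replace() string passes with a single per-character filtering pass that drops the forbidden characters in one traversal.
import Mathlib
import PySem

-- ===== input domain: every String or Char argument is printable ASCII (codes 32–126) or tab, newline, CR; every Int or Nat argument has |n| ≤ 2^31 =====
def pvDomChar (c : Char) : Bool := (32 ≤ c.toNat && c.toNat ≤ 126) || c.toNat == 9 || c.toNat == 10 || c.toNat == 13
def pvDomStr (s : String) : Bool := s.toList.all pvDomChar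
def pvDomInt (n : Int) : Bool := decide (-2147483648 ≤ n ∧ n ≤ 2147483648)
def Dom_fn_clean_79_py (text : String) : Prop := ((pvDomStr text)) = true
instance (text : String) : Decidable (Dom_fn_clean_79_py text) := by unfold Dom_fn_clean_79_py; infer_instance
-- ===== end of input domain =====

-- B replaces A's five sequential .replace() passes with a single per-character
-- filtering pass over the string (objective: simpler).


-- ===== PORT A =====
-- (the `text is None` guard cannot fire for a str argument; `str(text)` is the identity)
def fn_clean_79_py (text : String) : String :=
  let s := PySem.Str.replace (PySem.Str.replace text "\r" "") "\n" ""
  "#/`".toList.foldl (fun s ch => PySem.Str.replace s (String.ofList [ch]) "") s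

-- ===== PORT B =====
def fn_clean_79_py_alt (text : String) : String :=
  String.ofList (text.toList.filter (fun c => !("\r\n#/`".toList.contains c)))

-- ===== PRECONDITION & SPEC =====
def Spec_fn_clean_79_py (text : String) (out : String) : Prop := out = fn_clean_79_py_alt text
instance (text : String) (out : String) : Decidable (Spec_fn_clean_79_py text out) := by unfold Spec_fn_clean_79_py; infer_instance

-- ===== CLAIM (what is proved, stated in full; the proofs are below) =====
def Claim_equal_fn_clean_79_py : Prop := ∀ (text : String), Dom_fn_clean_79_py text → Spec_fn_clean_79_py text (fn_clean_79_py text)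

-- ===== LEMMAS AND PROOFS =====

-- deleting every occurrence of one character with Python's replace = filtering it out
theorem replace_go_single (ch : Char) (l acc : List Char) (fuel : Nat)
    (h : l.length ≤ fuel) :
    PySem.Chars.replace.go [ch] [] fuel l acc
      = acc.reverse ++ l.filter (fun c => !(c == ch)) := by
  induction l generalizing acc fuel with
  | nil =>
      cases fuel <;> simp [PySem.Chars.replace.go]
  | cons c t ih =>
      cases fuel with
      | zero => simp at h
      | succ n =>
        simp only [List.length_cons, Nat.succ_le_succ_iff] at h
        by_cases hc : c = ch
        · subst hc
          simp only [PySem.Chars.replace.go, List.isPrefixOf, beq_self_eq_true,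
            Bool.and_self, if_true, List.length_cons,
            List.length_nil, List.drop_succ_cons, List.drop_zero, List.reverse_nil,
            List.nil_append, List.filter_cons, Bool.not_true, Bool.false_eq_true,
            if_false]
          exact ih acc n h
        · have hpre : List.isPrefixOf [ch] (c :: t) = false := by
            simp [List.isPrefixOf]; intro hq; exact absurd hq.symm hc
          rw [PySem.Chars.replace.go]
          simp only [hpre, Bool.false_eq_true, if_false]
          rw [ih (c :: acc) n h]
          simp [hc]

theorem replace_single_eq_filter (ch : Char) (cs : List Char) :
    PySem.Chars.replace cs [ch] [] = cs.filter (fun c => !(c == ch)) := by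
  simp [PySem.Chars.replace, replace_go_single ch cs [] cs.length (le_refl _)]

theorem toList_alt (text : String) :
    (fn_clean_79_py_alt text).toList
      = text.toList.filter (fun c => !("\r\n#/`".toList.contains c)) := by
  simp [fn_clean_79_py_alt]

-- ===== VERDICT (by name: the statement is the Claim_ definition above) =====
theorem fn_clean_79_py_spec : Claim_equal_fn_clean_79_py := by
  intro text _
  show _ = _
  have h : (fn_clean_79_py text).toList = (fn_clean_79_py_alt text).toList := by
    rw [toList_alt]
    unfold fn_clean_79_py
    show (PySem.Str.replace (PySem.Str.replace (PySem.Str.replace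
        (PySem.Str.replace (PySem.Str.replace text "\r" "") "\n" "")
        (String.ofList ['#']) "") (String.ofList ['/']) "") (String.ofList ['`']) "").toList = _
    simp only [PySem.Str.toList_replace, String.toList_ofList,
      show ("\r".toList : List Char) = ['\r'] from rfl,
      show ("\n".toList : List Char) = ['\n'] from rfl,
      show ("".toList : List Char) = [] from rfl,
      replace_single_eq_filter, List.filter_filter]
    apply List.filter_congr
    intro c _
    simp only [show ("\r\n#/`".toList : List Char) = ['\r','\n','#','/','`'] from rfl,
      List.contains_cons, List.contains_nil]
    cases c == '\r' <;> cases c == '\n' <;> cases c == '#' <;> cases c == '/' <;>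
      cases c == '`' <;> rfl
  calc fn_clean_79_py text = String.ofList (fn_clean_79_py text).toList := by simp
    _ = String.ofList (fn_clean_79_py_alt text).toList := by rw [h]
    _ = fn_clean_79_py_alt text := by simp
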